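-- pv_equiv track=rewrite | github.com/SocialChoiceStudio/socialchoicelab | python/src/socialchoicelab/plots.py | _names_from_strategies
-- ===== SOURCE A (Python) =====
-- def _names_from_strategies(kinds: list[str]) -> list[str]:
--     """Generate display names from strategy kinds.
--
--     If a strategy appears once, just use its title-cased name (e.g. "Hunter").
--     If it appears multiple times, append a letter: "Hunter A", "Hunter B", etc.
--     """
--     from collections import Counter
--     counts = Counter(kinds)
--     labels: list[str] = []
--     counters: dict[str, int] = {}
--     for k in kinds:
--         nice = k.title()
--         if counts[k] == 1:
--             labels.append(nice)
--         else:
--             idx = counters.get(k, 0)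
--             counters[k] = idx + 1
--             labels.append(f"{nice} {chr(65 + idx)}")
--     return labels
-- ===== SOURCE B (Python) =====
-- def _names_from_strategies(kinds: list[str]) -> list[str]:
--     """Generate display names from strategy kinds.
--
--     Two-stage re-implementation: first group positions by kind into an
--     index dict, then fill a preallocated result list group by group,
--     writing each label at its original position.
--     """
--     positions: dict[str, list[int]] = {}
--     for i, k in enumerate(kinds):
--         positions.setdefault(k, []).append(i)
--     out = [""] * len(kinds)
--     for k, ps in positions.items():
--         nice = k.title()
--         if len(ps) == 1:
--             out[ps[0]] = nice
--         else:
--             for j, p in enumerate(ps):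
--                 out[p] = f"{nice} {chr(65 + j)}"
--     return out
-- ===== Notes on version B (the rewrite author's own statement) =====
-- stated objective: alternative
-- what changed: Instead of A's single left-to-right pass with a Counter and a running per-kind counters dict, B first builds an index dict mapping each kind to its list of positions, then fills a preallocated result list group by group, writing each label at its original position.
import Mathlib
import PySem

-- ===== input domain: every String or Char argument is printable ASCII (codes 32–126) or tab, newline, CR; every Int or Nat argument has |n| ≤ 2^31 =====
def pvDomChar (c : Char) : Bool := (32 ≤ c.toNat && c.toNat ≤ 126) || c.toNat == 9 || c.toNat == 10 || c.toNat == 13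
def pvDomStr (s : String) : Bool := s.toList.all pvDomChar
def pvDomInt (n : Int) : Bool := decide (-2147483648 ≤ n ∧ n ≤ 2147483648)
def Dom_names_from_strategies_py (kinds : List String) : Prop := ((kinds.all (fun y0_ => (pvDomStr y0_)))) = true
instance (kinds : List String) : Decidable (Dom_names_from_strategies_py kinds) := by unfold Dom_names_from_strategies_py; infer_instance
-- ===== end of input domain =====

-- B replaces A's single stateful pass by two stages: group positions by kind into an index
-- dict, then fill a preallocated result list group by group at the original positions.
-- Same values, not claimed faster.

-- shared helper: Python str.title() on ASCII (exact on Dom: a letter after a non-letter is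
-- uppercased, a letter after a letter is lowercased, other characters unchanged)
def pyTitleChars : List Char → Bool → List Char
  | [], _ => []
  | c :: cs, prev =>
    (if c.isAlpha then (if prev then c.toLower else c.toUpper) else c) :: pyTitleChars cs c.isAlpha

def pyTitle (s : String) : String := String.ofList (pyTitleChars s.toList false)

-- shared helper: chr(n) for the code points reached here
def pyChr (n : Int) : String := String.ofList [Char.ofNat n.toNat]

-- ===== PORT A =====
-- one step of A's loop body (counts = Counter(kinds); state = (labels, counters))
def stepA (counts : PySem.Dict String Int)
    (st : List String × PySem.Dict String Int) (k : String) :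
    List String × PySem.Dict String Int :=
  let nice := pyTitle k
  if counts.getD k 0 == 1 then (st.1 ++ [nice], st.2)
  else
    let idx := st.2.getD k 0
    (st.1 ++ [nice ++ " " ++ pyChr (65 + idx)], st.2.insert k (idx + 1))

def names_from_strategies_py (kinds : List String) : List String :=
  (kinds.foldl (stepA (PySem.Dict.counter kinds)) ([], PySem.Dict.empty)).1

-- ===== PORT B =====
-- stage 1 of Source B: positions.setdefault(k, []).append(i)  =  modify k [] (· ++ [i])
def buildPos (kinds : List String) : PySem.Dict String (List Int) :=
  (PySem.List.enumerate kinds).foldl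
    (fun d p => d.modify p.2 [] (fun ps => ps ++ [p.1])) PySem.Dict.empty

-- stage 2 of Source B: fill one group's positions; every written index is a nonnegative
-- in-range position from stage 1, so 'List.set' at '.toNat' is exact for out[p] = v
def fillGroup (out : List String) (kv : String × List Int) : List String :=
  let nice := pyTitle kv.1
  if kv.2.length == 1 then out.set (kv.2.headD 0).toNat nice
  else (PySem.List.enumerate kv.2).foldl
    (fun o q => o.set q.2.toNat (nice ++ " " ++ pyChr (65 + q.1))) out

def names_from_strategies_py_alt (kinds : List String) : List String :=
  ((buildPos kinds).items.foldl fillGroup (List.replicate kinds.length ""))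

-- ===== PRECONDITION & SPEC =====
def Spec_names_from_strategies_py (kinds : List String) (out : List String) : Prop := out = names_from_strategies_py_alt kinds
instance (kinds : List String) (out : List String) : Decidable (Spec_names_from_strategies_py kinds out) := by unfold Spec_names_from_strategies_py; infer_instance

-- ===== CLAIM (what is proved, stated in full; the proofs are below) =====
def Claim_equal_names_from_strategies_py : Prop := ∀ (kinds : List String), Dom_names_from_strategies_py kinds → Spec_names_from_strategies_py kinds (names_from_strategies_py kinds)

-- ===== LEMMAS AND PROOFS =====

-- the label at position i with kind k, as a pointwise formula (proof device only)
def bLabel (kinds : List String) (p : Int × String) : String :=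
  if PySem.List.count kinds p.2 == 1 then pyTitle p.2
  else pyTitle p.2 ++ " " ++
    pyChr (65 + PySem.List.count (PySem.List.slice kinds none (some p.1)) p.2)

-- A-side loop invariant: after processing pref, counters.getD k 0 is the prefix count of
-- every duplicated kind k, and the labels so far are the pointwise labels of the prefix.
lemma loopA (kinds : List String) :
    ∀ (rest pref acc : List String) (counters : PySem.Dict String Int),
      pref ++ rest = kinds →
      (∀ k, kinds.count k ≠ 1 → counters.getD k 0 = (pref.count k : Int)) →
      (rest.foldl (stepA (PySem.Dict.counter kinds)) (acc, counters)).1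
        = acc ++ (PySem.List.enumerate rest (pref.length : Int)).map (bLabel kinds) := by
  intro rest
  induction rest with
  | nil => intro pref acc counters _ _; simp [PySem.List.enumerate_nil]
  | cons r rs ih =>
    intro pref acc counters hsplit hinv
    rw [List.foldl_cons, PySem.List.enumerate_cons]
    have hcount : (PySem.Dict.counter kinds).getD r 0 = (kinds.count r : Int) := by
      simpa using PySem.Dict.getD_counter (xs := kinds) (v := r)
    have hslice : PySem.List.slice kinds none (some (pref.length : Int)) = pref := by
      rw [PySem.List.slice_to_natCast]
      rw [← hsplit, List.take_left]
    by_cases h1 : kinds.count r = 1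
    · have hb : ((PySem.Dict.counter kinds).getD r 0 == 1) = true := by
        rw [hcount, h1]; decide
      have hstep : stepA (PySem.Dict.counter kinds) (acc, counters) r
          = (acc ++ [pyTitle r], counters) := by
        simp only [stepA]; rw [hb]; simp
      have hbl : bLabel kinds ((pref.length : Int), r) = pyTitle r := by
        unfold bLabel
        simp [PySem.List.count_eq, h1]
      rw [hstep, ih (pref ++ [r]) (acc ++ [pyTitle r]) counters (by simpa using hsplit) ?_]
      · simp [hbl, List.map_cons]
      · intro k hk
        have hne : k ≠ r := fun he => hk (he ▸ h1)
        rw [hinv k hk, List.count_append]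
        simp [List.count_singleton, Ne.symm hne]
    · have hb : ((PySem.Dict.counter kinds).getD r 0 == 1) = false := by
        rw [hcount]
        simpa using fun he => h1 (by exact_mod_cast he)
      have hidx : counters.getD r 0 = (pref.count r : Int) := hinv r h1
      have hstep : stepA (PySem.Dict.counter kinds) (acc, counters) r
          = (acc ++ [pyTitle r ++ " " ++ pyChr (65 + (pref.count r : Int))],
             counters.insert r ((pref.count r : Int) + 1)) := by
        simp only [stepA]; rw [hb]; simp [hidx]
      have hbl : bLabel kinds ((pref.length : Int), r)
          = pyTitle r ++ " " ++ pyChr (65 + (pref.count r : Int)) := by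
        unfold bLabel
        rw [PySem.List.count_eq, if_neg (by simpa using h1), hslice, PySem.List.count_eq]
      rw [hstep, ih (pref ++ [r]) _ _ (by simpa using hsplit) ?_]
      · simp [hbl, List.map_cons]
      · intro k hk
        by_cases he : k = r
        · subst he
          rw [PySem.Dict.getD_insert]
          simp [List.count_append, List.count_singleton]
        · rw [PySem.Dict.getD_insert, if_neg he, hinv k hk, List.count_append]
          simp [List.count_singleton, Ne.symm he]

-- positions of k in xs, starting at index i (proof device)
def posFrom (k : String) : Int → List String → List Int
  | _, [] => []
  | i, x :: xs => if x = k then i :: posFrom k (i+1) xs else posFrom k (i+1) xs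

lemma build_getD (k : String) :
    ∀ (xs : List String) (i : Int) (d : PySem.Dict String (List Int)),
      ((PySem.List.enumerate xs i).foldl
          (fun d p => d.modify p.2 [] (fun ps => ps ++ [p.1])) d).getD k []
        = d.getD k [] ++ posFrom k i xs := by
  intro xs
  induction xs with
  | nil => intro i d; simp [PySem.List.enumerate_nil, posFrom]
  | cons x xs ih =>
    intro i d
    rw [PySem.List.enumerate_cons, List.foldl_cons, ih]
    by_cases hx : x = k
    · subst hx
      rw [PySem.Dict.getD_modify, if_pos rfl]
      simp [posFrom]
    · rw [PySem.Dict.getD_modify, if_neg (fun h => hx h.symm)]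
      simp [posFrom, hx]

lemma buildPos_keys (kinds : List String) :
    (buildPos kinds).keys = PySem.Set.ofList kinds := by
  unfold buildPos
  rw [PySem.Dict.keys_foldl_modify_key]
  simp [PySem.List.map_snd_enumerate, PySem.Set.update_nil_left]

lemma buildPos_nodup (kinds : List String) : (buildPos kinds).keys.Nodup := by
  rw [buildPos_keys]; exact PySem.Set.nodup_ofList kinds

lemma buildPos_items (kinds : List String) :
    (buildPos kinds).items
      = (PySem.Set.ofList kinds).map (fun k => (k, posFrom k 0 kinds)) := by
  rw [PySem.Dict.items_eq_map_keys (buildPos kinds) (buildPos_nodup kinds) [],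
    buildPos_keys]
  apply List.map_congr_left
  intro k _
  have := build_getD k kinds 0 PySem.Dict.empty
  unfold buildPos
  rw [this]
  simp

lemma posFrom_length (k : String) :
    ∀ (xs : List String) (i : Int), (posFrom k i xs).length = xs.count k := by
  intro xs
  induction xs with
  | nil => intro i; simp [posFrom]
  | cons x xs ih =>
    intro i
    by_cases hx : x = k
    · simp [posFrom, hx, ih, List.count_cons]
    · simp [posFrom, hx, ih, List.count_cons, Ne.symm hx]

lemma posFrom_spec (k : String) :
    ∀ (xs : List String) (i : Int) (j : Nat) (p : Int),
      (posFrom k i xs)[j]? = some p →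
      ∃ m : Nat, p = i + m ∧ xs[m]? = some k ∧ (xs.take m).count k = j := by
  intro xs
  induction xs with
  | nil => intro i j p h; simp [posFrom] at h
  | cons x xs ih =>
    intro i j p h
    by_cases hx : x = k
    · subst hx
      rw [posFrom, if_pos rfl] at h
      cases j with
      | zero =>
        simp at h
        exact ⟨0, by simpa using h.symm, by simp, by simp⟩
      | succ j =>
        simp only [List.getElem?_cons_succ] at h
        obtain ⟨m, hp, hg, hc⟩ := ih (i + 1) j p h
        refine ⟨m + 1, by push_cast [hp]; ring, by simpa using hg, ?_⟩
        simp [List.take_succ_cons, List.count_cons, hc]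
    · rw [posFrom, if_neg hx] at h
      obtain ⟨m, hp, hg, hc⟩ := ih (i + 1) j p h
      refine ⟨m + 1, by push_cast [hp]; ring, by simpa using hg, ?_⟩
      simp [List.take_succ_cons, List.count_cons, hc, hx]

lemma posFrom_mem (k : String) :
    ∀ (xs : List String) (i : Int) (m : Nat), xs[m]? = some k →
      (i + m) ∈ posFrom k i xs := by
  intro xs
  induction xs with
  | nil => intro i m h; simp at h
  | cons x xs ih =>
    intro i m h
    cases m with
    | zero =>
      simp at h
      simp [posFrom, h]
    | succ m =>
      simp only [List.getElem?_cons_succ] at h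
      have h2 := ih (i + 1) m h
      have he : i + ((m + 1 : Nat) : Int) = (i + 1) + (m : Int) := by push_cast; ring
      rw [he]
      by_cases hx : x = k <;> simp [posFrom, hx, h2]

-- the writes a group performs, and the fill loops as folds over writes
def wstep (o : List String) (w : Int × String) : List String := o.set w.1.toNat w.2

def writesOf (kv : String × List Int) : List (Int × String) :=
  if kv.2.length == 1 then [(kv.2.headD 0, pyTitle kv.1)]
  else (PySem.List.enumerate kv.2).map
    (fun q => (q.2, pyTitle kv.1 ++ " " ++ pyChr (65 + q.1)))

lemma fillGroup_eq_writes (out : List String) (kv : String × List Int) :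
    fillGroup out kv = (writesOf kv).foldl wstep out := by
  unfold fillGroup writesOf
  by_cases h : (kv.2.length == 1) = true
  · simp [h, wstep]
  · simp only [Bool.not_eq_true] at h
    simp [h, wstep, List.foldl_map]

lemma foldl_fillGroup_eq :
    ∀ (groups : List (String × List Int)) (out : List String),
      groups.foldl fillGroup out = (groups.flatMap writesOf).foldl wstep out := by
  intro groups
  induction groups with
  | nil => intro out; simp
  | cons g gs ih =>
    intro out
    rw [List.foldl_cons, List.flatMap_cons, List.foldl_append, ih, fillGroup_eq_writes]

lemma foldl_wstep_get (target : List String) :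
    ∀ (ws : List (Int × String)) (out : List String), out.length = target.length →
      (∀ w ∈ ws, 0 ≤ w.1 ∧ w.1.toNat < target.length ∧ target[w.1.toNat]? = some w.2) →
      ∀ i : Nat, (ws.foldl wstep out)[i]?
        = if ∃ w ∈ ws, w.1.toNat = i then target[i]? else out[i]? := by
  intro ws
  induction ws with
  | nil => intro out hlen hok i; simp
  | cons w ws ih =>
    intro out hlen hok i
    obtain ⟨hw0, hwlt, hwv⟩ := hok w (by simp)
    rw [List.foldl_cons,
      ih (wstep out w) (by simp [wstep, hlen]) (fun w' hw' => hok w' (by simp [hw'])) i]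
    by_cases hrest : ∃ w' ∈ ws, w'.1.toNat = i
    · rw [if_pos hrest, if_pos]
      obtain ⟨w', hw', he⟩ := hrest
      exact ⟨w', by simp [hw'], he⟩
    · rw [if_neg hrest]
      by_cases hwi : w.1.toNat = i
      · rw [if_pos ⟨w, by simp, hwi⟩]
        subst hwi
        rw [hwv]
        simp only [wstep]
        rw [List.getElem?_set_self (by omega)]
      · rw [if_neg ?_]
        · simp only [wstep]
          rw [List.getElem?_set_ne (fun h => hwi h)]
        · rintro ⟨w', hw', he⟩
          rcases List.mem_cons.mp hw' with h | h
          · exact hwi (h ▸ he)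
          · exact hrest ⟨w', h, he⟩

lemma target_get (kinds : List String) (m : Nat) (k : String)
    (h : kinds[m]? = some k) :
    ((PySem.List.enumerate kinds).map (bLabel kinds))[m]?
      = some (bLabel kinds ((m : Int), k)) := by
  rw [List.getElem?_map]
  have : (PySem.List.enumerate kinds)[m]? = some ((m : Int), k) := by
    rw [PySem.List.getElem?_enumerate, h]
    simp
  rw [this]
  simp

lemma write_ok (kinds : List String) (k : String) (w : Int × String)
    (hw : w ∈ writesOf (k, posFrom k 0 kinds)) :
    0 ≤ w.1 ∧ w.1.toNat < kinds.length ∧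
      ((PySem.List.enumerate kinds).map (bLabel kinds))[w.1.toNat]? = some w.2 := by
  unfold writesOf at hw
  by_cases hlen : ((posFrom k 0 kinds).length == 1) = true
  · rw [if_pos hlen] at hw
    simp only [List.mem_singleton] at hw
    have h1 : kinds.count k = 1 := by
      rw [← posFrom_length k kinds 0]; simpa using hlen
    obtain ⟨p, hps⟩ := List.length_eq_one_iff.mp (by simpa using hlen)
    have hp0 : (posFrom k 0 kinds)[0]? = some p := by rw [hps]; simp
    obtain ⟨m, hpm, hg, _⟩ := posFrom_spec k kinds 0 0 p hp0
    have hmlt : m < kinds.length := (List.getElem?_eq_some_iff.mp hg).1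
    have hw1 : w.1 = (m : Int) := by rw [hw, hps]; simpa using hpm
    refine ⟨by rw [hw1]; positivity, by rw [hw1]; simpa using hmlt, ?_⟩
    rw [hw1]
    simp only [Int.toNat_natCast]
    rw [target_get kinds m k hg]
    unfold bLabel
    rw [PySem.List.count_eq]
    simp [h1, hw]
  · rw [if_neg hlen] at hw
    obtain ⟨q, hq, hwq⟩ := List.mem_map.mp hw
    obtain ⟨j, hj, hqe⟩ := (PySem.List.mem_enumerate_iff _ _ _).mp hq
    have hpj : (posFrom k 0 kinds)[j]? = some ((posFrom k 0 kinds)[j]) :=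
      List.getElem?_eq_some_iff.mpr ⟨hj, rfl⟩
    obtain ⟨m, hpm, hg, hc⟩ := posFrom_spec k kinds 0 j _ hpj
    have hmlt : m < kinds.length := (List.getElem?_eq_some_iff.mp hg).1
    have hne1 : kinds.count k ≠ 1 := by
      rw [← posFrom_length k kinds 0]
      simpa using hlen
    have hw1 : w.1 = (m : Int) := by
      rw [← hwq, hqe]; simpa using hpm
    refine ⟨by rw [hw1]; positivity, by rw [hw1]; simpa using hmlt, ?_⟩
    rw [hw1]
    simp only [Int.toNat_natCast]
    rw [target_get kinds m k hg]
    unfold bLabel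
    rw [PySem.List.count_eq, if_neg (by simpa using hne1), PySem.List.slice_to_natCast,
      PySem.List.count_eq]
    rw [← hwq, hqe]
    simp [hc]

lemma write_cover (kinds : List String) (i : Nat) (hi : i < kinds.length) :
    ∃ w ∈ (((PySem.Set.ofList kinds).map
        (fun k => (k, posFrom k 0 kinds))).flatMap writesOf), w.1.toNat = i := by
  set k := kinds[i] with hk
  have hg : kinds[i]? = some k := List.getElem?_eq_some_iff.mpr ⟨hi, rfl⟩
  have hkv : (k, posFrom k 0 kinds)
      ∈ (PySem.Set.ofList kinds).map (fun k => (k, posFrom k 0 kinds)) :=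
    List.mem_map.mpr ⟨k, (PySem.Set.mem_ofList _ _).mpr (List.getElem_mem hi), rfl⟩
  have hmem : ((i : Nat) : Int) ∈ posFrom k 0 kinds := by
    simpa using posFrom_mem k kinds 0 i hg
  by_cases hlen : ((posFrom k 0 kinds).length == 1) = true
  · obtain ⟨p, hps⟩ := List.length_eq_one_iff.mp (by simpa using hlen)
    have hpi : p = ((i : Nat) : Int) := by
      have h2 := hmem; rw [hps] at h2; simp at h2; exact h2.symm
    refine ⟨((posFrom k 0 kinds).headD 0, pyTitle k), ?_, ?_⟩
    · refine List.mem_flatMap.mpr ⟨(k, posFrom k 0 kinds), hkv, ?_⟩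
      simp [writesOf, hlen]
    · simp [hps, hpi]
  · obtain ⟨j, hj, hje⟩ := List.mem_iff_getElem.mp hmem
    refine ⟨((posFrom k 0 kinds)[j],
        pyTitle k ++ " " ++ pyChr (65 + ((0 : Int) + (j : Nat)))), ?_, ?_⟩
    · refine List.mem_flatMap.mpr ⟨(k, posFrom k 0 kinds), hkv, ?_⟩
      simp only [writesOf, if_neg hlen]
      exact List.mem_map.mpr ⟨((0 : Int) + (j : Nat), (posFrom k 0 kinds)[j]),
        (PySem.List.mem_enumerate_iff _ _ _).mpr ⟨j, hj, rfl⟩, rfl⟩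
    · simp [hje]

lemma alt_eq_target (kinds : List String) :
    names_from_strategies_py_alt kinds
      = (PySem.List.enumerate kinds).map (bLabel kinds) := by
  unfold names_from_strategies_py_alt
  rw [buildPos_items, foldl_fillGroup_eq]
  set target := (PySem.List.enumerate kinds).map (bLabel kinds) with htarget
  have htlen : target.length = kinds.length := by
    simp [htarget, PySem.List.length_enumerate]
  set ws := (((PySem.Set.ofList kinds).map
      (fun k => (k, posFrom k 0 kinds))).flatMap writesOf) with hws
  have hok : ∀ w ∈ ws, 0 ≤ w.1 ∧ w.1.toNat < target.length ∧
      target[w.1.toNat]? = some w.2 := by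
    intro w hw
    obtain ⟨kv, hkv, hwkv⟩ := List.mem_flatMap.mp hw
    obtain ⟨k, _, rfl⟩ := List.mem_map.mp hkv
    have := write_ok kinds k w hwkv
    rw [htlen]
    exact this
  apply List.ext_getElem?
  intro i
  rw [foldl_wstep_get target ws (List.replicate kinds.length "")
    (by simp [htlen]) hok i]
  by_cases hi : i < kinds.length
  · rw [if_pos (write_cover kinds i hi)]
  · rw [if_neg ?_]
    · rw [List.getElem?_eq_none (by simpa using hi),
        List.getElem?_eq_none (by omega)]
    · rintro ⟨w, hw, he⟩
      exact hi (he ▸ ((hok w hw).2.1.trans_eq htlen))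

-- ===== VERDICT (by name: the statement is the Claim_ definition above) =====
theorem names_from_strategies_py_spec : Claim_equal_names_from_strategies_py := by
  intro kinds _
  unfold Spec_names_from_strategies_py names_from_strategies_py
  rw [alt_eq_target]
  rw [loopA kinds kinds [] [] PySem.Dict.empty rfl (by intro k _; simp [PySem.Dict.getD, PySem.Dict.empty, PySem.Dict.get?])]
  simp
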